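-- pv_equiv track=rewrite | github.com/adesurya16/KriptoCipher | playfair_cipher.py | chageStringToBigram
-- ===== SOURCE A (Python) =====
-- def upper(str):
-- 	return str.upper()
--
-- def isAlphabet(ch):
-- 	return (ch >= 'a' and ch <= 'z') or (ch >= 'A' and ch <= 'Z')
--
-- def chageStringToBigram(str,separator = 'Z'):
-- 	list = []
-- 	tp1 = ''
-- 	tp2 = ''
-- 	for ch in str:
-- 		if isAlphabet(ch):
-- 			if tp1 == '':
-- 				tp1 = upper(ch)
-- 			elif tp2 == '':
-- 				tp2 = upper(ch);
-- 				if tp1 == tp2: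
-- 					list.append((tp1,separator))
-- 					tp1, tp2 = tp2, ''
-- 				else :
-- 					list.append((tp1,tp2))
-- 					tp1, tp2 = '', ''
-- 	if tp1 != '':
-- 		list.append((tp1,separator))
-- 	return list
-- ===== SOURCE B (Python) =====
-- def chageStringToBigram(str, separator='Z'):
--     cleaned = [ch.upper() for ch in str
--                if ('a' <= ch <= 'z') or ('A' <= ch <= 'Z')]
--     out = []
--     i = 0
--     n = len(cleaned)
--     while i < n:
--         if i + 1 < n and cleaned[i] == cleaned[i + 1]:
--             out.append((cleaned[i], separator))
--             i += 1
--         elif i + 1 < n: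
--             out.append((cleaned[i], cleaned[i + 1]))
--             i += 2
--         else:
--             out.append((cleaned[i], separator))
--             i += 1
--     return out
-- ===== Notes on version B (the rewrite author's own statement) =====
-- stated objective: simpler
-- what changed: Replaces A's two-slot tp1/tp2 state machine with a pre-filter pass producing the cleaned uppercase letters followed by an explicit lookahead loop over them.
import Mathlib
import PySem

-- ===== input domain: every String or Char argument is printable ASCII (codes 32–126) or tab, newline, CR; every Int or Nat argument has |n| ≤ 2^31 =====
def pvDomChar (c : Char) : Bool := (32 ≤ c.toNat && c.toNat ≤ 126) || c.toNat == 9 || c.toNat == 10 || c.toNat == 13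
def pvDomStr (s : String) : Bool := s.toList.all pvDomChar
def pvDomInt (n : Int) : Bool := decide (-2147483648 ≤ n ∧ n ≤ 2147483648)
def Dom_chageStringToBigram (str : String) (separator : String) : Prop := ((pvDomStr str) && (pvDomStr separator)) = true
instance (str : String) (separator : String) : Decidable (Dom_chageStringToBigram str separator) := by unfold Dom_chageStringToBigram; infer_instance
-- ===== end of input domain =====

-- B replaces A's two-slot state machine with a pre-filter pass plus an explicit lookahead loop (simpler decomposition, same cost).

-- ===== PORT A =====
-- helper `isAlphabet` (the char of the for-loop; 1-char string comparisons = char comparisons)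
def pvIsAlphabet (ch : Char) : Bool :=
  (decide ('a' ≤ ch) && decide (ch ≤ 'z')) || (decide ('A' ≤ ch) && decide (ch ≤ 'Z'))

-- helper `upper` applied to the 1-char string of the loop variable
def pvUpper1 (ch : Char) : String := PySem.Str.upper (String.ofList [ch])

def chageStringToBigram (str : String) (separator : String) : List (String × String) :=
  let st := str.toList.foldl
    (fun (s : List (String × String) × String × String) ch =>
      if pvIsAlphabet ch then
        if s.2.1 = "" then (s.1, pvUpper1 ch, s.2.2)
        else if s.2.2 = "" then
          let tp2 := pvUpper1 ch
          if s.2.1 = tp2 then (s.1 ++ [(s.2.1, separator)], tp2, "")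
          else (s.1 ++ [(s.2.1, tp2)], "", "")
        else s
      else s)
    ([], "", "")
  if st.2.1 ≠ "" then st.1 ++ [(st.2.1, separator)] else st.1

-- ===== PORT B =====
-- the while loop of Source B: lookahead over the cleaned list, advancing by 1 or 2
def pvPack (separator : String) : List String → List (String × String)
  | [] => []
  | [c] => [(c, separator)]
  | c1 :: c2 :: t =>
      if c1 = c2 then (c1, separator) :: pvPack separator (c2 :: t)
      else (c1, c2) :: pvPack separator t

def chageStringToBigram_alt (str : String) (separator : String) : List (String × String) :=
  let cleaned := (str.toList.filter pvIsAlphabet).map pvUpper1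
  pvPack separator cleaned

-- ===== PRECONDITION & SPEC =====
def Spec_chageStringToBigram (str : String) (separator : String) (out : List (String × String)) : Prop := out = chageStringToBigram_alt str separator
instance (str : String) (separator : String) (out : List (String × String)) : Decidable (Spec_chageStringToBigram str separator out) := by unfold Spec_chageStringToBigram; infer_instance

-- ===== CLAIM (what is proved, stated in full; the proofs are below) =====
def Claim_equal_chageStringToBigram : Prop := ∀ (str : String) (separator : String), Dom_chageStringToBigram str separator → Spec_chageStringToBigram str separator (chageStringToBigram str separator)

-- ===== LEMMAS AND PROOFS =====

-- the loop body of A, restated on the cleaned (already filtered + uppercased) element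
def pvStepC (separator : String) (s : List (String × String) × String × String) (c : String) :
    List (String × String) × String × String :=
  if s.2.1 = "" then (s.1, c, s.2.2)
  else if s.2.2 = "" then
    if s.2.1 = c then (s.1 ++ [(s.2.1, separator)], c, "")
    else (s.1 ++ [(s.2.1, c)], "", "")
  else s

def pvFin (separator : String) (st : List (String × String) × String × String) :
    List (String × String) :=
  if st.2.1 ≠ "" then st.1 ++ [(st.2.1, separator)] else st.1

lemma pvUpper1_ne (ch : Char) : pvUpper1 ch ≠ "" := by
  intro h
  have := congrArg String.toList h
  simp [pvUpper1, PySem.Str.toList_upper, PySem.Chars.upper] at this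

lemma foldl_filter_map (separator : String) (l : List Char) :
    ∀ st, l.foldl
      (fun (s : List (String × String) × String × String) ch =>
        if pvIsAlphabet ch then
          if s.2.1 = "" then (s.1, pvUpper1 ch, s.2.2)
          else if s.2.2 = "" then
            let tp2 := pvUpper1 ch
            if s.2.1 = tp2 then (s.1 ++ [(s.2.1, separator)], tp2, "")
            else (s.1 ++ [(s.2.1, tp2)], "", "")
          else s
        else s) st
    = ((l.filter pvIsAlphabet).map pvUpper1).foldl (pvStepC separator) st := by
  induction l with
  | nil => intro st; simp
  | cons c t ih =>
      intro st
      by_cases hc : pvIsAlphabet c = true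
      · simp [List.foldl_cons, hc, ih, pvStepC]
      · simp [List.foldl_cons, hc, ih]

lemma pack_main (separator : String) :
    ∀ (cs : List String), (∀ s ∈ cs, s ≠ "") →
      (∀ acc, pvFin separator (cs.foldl (pvStepC separator) (acc, "", "")) = acc ++ pvPack separator cs)
      ∧ (∀ acc t1, t1 ≠ "" →
          pvFin separator (cs.foldl (pvStepC separator) (acc, t1, "")) = acc ++ pvPack separator (t1 :: cs)) := by
  intro cs
  induction cs with
  | nil =>
      intro _
      refine ⟨fun acc => by simp [pvFin, pvPack], fun acc t1 h1 => by simp [pvFin, pvPack, h1]⟩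
  | cons c t ih =>
      intro hne
      have hc : c ≠ "" := hne c (by simp)
      have ih' := ih (fun s hs => hne s (by simp [hs]))
      constructor
      · intro acc
        simpa [List.foldl_cons, pvStepC] using ih'.2 acc c hc
      · intro acc t1 h1
        by_cases heq : t1 = c
        · subst heq
          have := ih'.2 (acc ++ [(t1, separator)]) t1 h1
          simp [List.foldl_cons, pvStepC, h1, pvPack, this]
        · have := ih'.1 (acc ++ [(t1, c)])
          simp [List.foldl_cons, pvStepC, h1, heq, pvPack, this]

-- ===== VERDICT (by name: the statement is the Claim_ definition above) =====
theorem chageStringToBigram_spec : Claim_equal_chageStringToBigram := by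
  intro str separator _
  unfold Spec_chageStringToBigram chageStringToBigram chageStringToBigram_alt
  rw [foldl_filter_map]
  have h := (pack_main separator ((str.toList.filter pvIsAlphabet).map pvUpper1)
    (by intro s hs; simp at hs; obtain ⟨c, _, rfl⟩ := hs; exact pvUpper1_ne c)).1 []
  simpa [pvFin] using h
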